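-- pv_equiv track=rewrite | github.com/tillahoffmann/collectiontools | src/collectiontools/__init__.py | transpose_to_list
-- ===== SOURCE A (Python) =====
-- from typing import (
--     Any,
--     Callable,
--     Dict,
--     Iterable,
--     List,
--     Mapping,
--     Optional,
--     Sequence,
--     Union,
-- )
--
-- def transpose_to_list(x: Mapping[Any, Sequence]) -> List[Dict]:
--     """
--     Transpose a mapping of iterables to a list of dictionaries.
--     """
--     sizes = {key: len(value) for key, value in x.items()}
--     unique_sizes = set(sizes.values())
--     if len(unique_sizes) > 1:
--         raise ValueError(f"Mapping has inconsistent sizes: {sizes}.")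
--     (size,) = unique_sizes
--     y = []
--     for i in range(size):
--         y.append({key: value[i] for key, value in x.items()})
--     return y
-- ===== SOURCE B (Python) =====
-- def transpose_to_list(x):
--     """
--     Transpose a mapping of iterables to a list of dictionaries.
--     """
--     sizes = {key: len(value) for key, value in x.items()}
--     unique_sizes = set(sizes.values())
--     if len(unique_sizes) > 1:
--         raise ValueError(f"Mapping has inconsistent sizes: {sizes}.")
--     (size,) = unique_sizes
--     y = [{} for _ in range(size)]
--     for key, value in x.items():
--         for i, v in enumerate(value):
--             y[i][key] = v
--     return y
-- ===== Notes on version B (the rewrite author's own statement) =====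
-- stated objective: alternative
-- what changed: B inverts the traversal: instead of building each output dict fully per index i (row-wise comprehension over x.items() inside a loop over range(size)), it pre-allocates all size output dicts and fills them column by column, looping over x.items() on the outside and enumerate(value) on the inside, maintaining all dicts partially.
import Mathlib
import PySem

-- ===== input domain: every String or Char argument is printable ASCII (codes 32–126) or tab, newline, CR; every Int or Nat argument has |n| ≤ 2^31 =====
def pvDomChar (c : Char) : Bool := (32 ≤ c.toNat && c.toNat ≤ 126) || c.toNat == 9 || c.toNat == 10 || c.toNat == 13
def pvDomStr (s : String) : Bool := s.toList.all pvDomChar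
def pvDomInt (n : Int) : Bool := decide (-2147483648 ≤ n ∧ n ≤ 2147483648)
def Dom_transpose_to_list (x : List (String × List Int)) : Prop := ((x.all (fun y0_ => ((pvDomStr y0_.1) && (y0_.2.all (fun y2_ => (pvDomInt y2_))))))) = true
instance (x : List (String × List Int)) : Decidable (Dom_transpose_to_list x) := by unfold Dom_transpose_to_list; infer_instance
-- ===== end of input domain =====

-- B fills the `size` output dicts column by column (outer loop over the mapping's items,
-- inner loop over enumerate(value)) instead of A's row-wise dict comprehension per index.
-- Equivalence of the RETURN value; neither program mutates its argument.

-- ===== PORT A =====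
-- sizes = {key: len(value) ...}; unique_sizes = set(sizes.values()); the match's
-- `[size]` arm is `(size,) = unique_sizes`; the other arms are the ValueError paths
-- (len(unique_sizes) > 1, or empty mapping), excluded by Pre_.  value[i] is ported
-- as pyGetD: in the `[size]` arm every surviving (last-occurrence) length equals
-- size, exactly as for the Python dict, so the lookup Python performs never raises.
def transpose_to_list (x : List (String × List Int)) : List (List (String × Int)) :=
  match PySem.Set.ofList
      (PySem.Dict.values (x.foldl (fun d kv => d.insert kv.1 ((kv.2.length : Int))) PySem.Dict.empty)) with
  | [size] =>
      (PySem.List.pyRange 0 size 1).map (fun i =>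
        PySem.Dict.items (x.foldl (fun d kv => d.insert kv.1 (PySem.List.pyGetD kv.2 i 0)) PySem.Dict.empty))
  | _ => []

-- ===== PORT B =====
-- same validation lines as Source B, then y = [{} for _ in range(size)] and the
-- column-wise fill: for key, value in x.items(): for i, v in enumerate(value): y[i][key] = v
def transpose_to_list_alt (x : List (String × List Int)) : List (List (String × Int)) :=
  match PySem.Set.ofList
      (PySem.Dict.values (x.foldl (fun d kv => d.insert kv.1 ((kv.2.length : Int))) PySem.Dict.empty)) with
  | [] => []
  | _ :: _ :: _ => []
  | [size] =>
      (x.foldl (fun y kv =>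
          (PySem.List.enumerate kv.2 0).foldl (fun y iv =>
            y.set iv.1.toNat ((y.getD iv.1.toNat PySem.Dict.empty).insert kv.1 iv.2)) y)
        (List.replicate size.toNat PySem.Dict.empty)).map PySem.Dict.items

-- ===== PRECONDITION & SPEC =====
-- Pre_ excludes exactly the inputs on which A raises ValueError: the empty mapping
-- (the `(size,) = unique_sizes` unpacking fails) and mappings whose values have
-- inconsistent lengths (the explicit raise).
def Pre_transpose_to_list (x : List (String × List Int)) : Prop :=
  x ≠ [] ∧ ∀ p ∈ x, ∀ q ∈ x, p.2.length = q.2.length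
instance (x : List (String × List Int)) : Decidable (Pre_transpose_to_list x) := by
  unfold Pre_transpose_to_list; infer_instance
def pvWitness_transpose_to_list : (List (String × List Int)) := [("a", [1, 2]), ("b", [3, 4])]
def Spec_transpose_to_list (x : List (String × List Int)) (out : List (List (String × Int))) : Prop := out = transpose_to_list_alt x
instance (x : List (String × List Int)) (out : List (List (String × Int))) : Decidable (Spec_transpose_to_list x out) := by unfold Spec_transpose_to_list; infer_instance

-- ===== CLAIM (what is proved, stated in full; the proofs are below) =====
def Claim_equal_transpose_to_list : Prop := ∀ (x : List (String × List Int)), Dom_transpose_to_list x → Pre_transpose_to_list x → Spec_transpose_to_list x (transpose_to_list x)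

-- ===== LEMMAS AND PROOFS =====

-- every value stored by the sizes-building fold is the constant c
theorem values_foldl_len_const (c : Int) :
    ∀ (l : List (String × List Int)) (d : PySem.Dict String Int),
      (∀ v ∈ d.values, v = c) → (∀ kv ∈ l, (kv.2.length : Int) = c) →
      ∀ v ∈ (l.foldl (fun d kv => d.insert kv.1 ((kv.2.length : Int))) d).values, v = c := by
  intro l
  induction l with
  | nil => intro d hd _ v hv; exact hd v hv
  | cons kv tl ih =>
      intro d hd hl v hv
      refine ih _ ?_ (fun p hp => hl p (List.mem_cons_of_mem _ hp)) v hv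
      intro w hw
      rcases PySem.Dict.mem_values_insert _ _ _ _ hw with h | h
      · rw [h]; exact hl kv (List.mem_cons_self)
      · exact hd w h

theorem ofList_all_const (c : Int) :
    ∀ (l : List Int), l ≠ [] → (∀ v ∈ l, v = c) → PySem.Set.ofList l = [c] := by
  intro l hne hall
  cases l with
  | nil => exact absurd rfl hne
  | cons v tl =>
      have hv : v = c := hall v (List.mem_cons_self)
      subst hv
      rw [PySem.Set.ofList_cons]
      have : PySem.Set.discard (PySem.Set.ofList tl) v = [] := by
        apply List.eq_nil_iff_forall_not_mem.mpr
        intro y hy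
        rw [PySem.Set.mem_discard] at hy
        exact hy.2 (hall y (List.mem_cons_of_mem _ ((PySem.Set.mem_ofList _ _).mp hy.1)))
      rw [this]

-- (pre ++ a :: l).set pre.length w = pre ++ w :: l
theorem set_append_length {α : Type} (w : α) :
    ∀ (pre : List α) (a : α) (l : List α), (pre ++ a :: l).set pre.length w = pre ++ w :: l := by
  intro pre
  induction pre with
  | nil => intro a l; rfl
  | cons p ps ih => intro a l; simp [List.set_cons_succ, ih]

-- (pre ++ a :: l).getD pre.length d = a
theorem getD_append_length {α : Type} (d : α) :
    ∀ (pre : List α) (a : α) (l : List α), (pre ++ a :: l).getD pre.length d = a := by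
  intro pre
  induction pre with
  | nil => intro a l; rfl
  | cons p ps ih => intro a l; simp [ih]

-- the inner enumerate-loop of B, on a state split as pre ++ suf, zips the values into suf
theorem inner_loop_eq_zipWith (key : String) :
    ∀ (vs : List Int) (pre suf : List (PySem.Dict String Int)), vs.length ≤ suf.length →
      (PySem.List.enumerate vs (pre.length : Int)).foldl
          (fun y iv => y.set iv.1.toNat ((y.getD iv.1.toNat PySem.Dict.empty).insert key iv.2)) (pre ++ suf)
        = pre ++ (List.zipWith (fun d v => d.insert key v) suf vs) ++ suf.drop vs.length := by
  intro vs
  induction vs with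
  | nil => intro pre suf _; simp [PySem.List.enumerate_nil]
  | cons v tl ih =>
      intro pre suf hlen
      cases suf with
      | nil => simp at hlen
      | cons d suf' =>
          rw [PySem.List.enumerate_cons, List.foldl_cons]
          have hset : (pre ++ d :: suf').set ((pre.length : Int)).toNat
              (((pre ++ d :: suf').getD ((pre.length : Int)).toNat PySem.Dict.empty).insert key v)
              = pre ++ (d.insert key v) :: suf' := by
            simp only [Int.toNat_natCast]
            rw [getD_append_length, set_append_length]
          rw [hset]
          have hstep : ((pre.length : Int) + 1) = (((pre ++ [d.insert key v]).length : Nat) : Int) := by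
            simp
          rw [hstep]
          rw [List.append_cons pre (d.insert key v) suf']
          have := ih (pre ++ [d.insert key v]) suf' (Nat.le_of_succ_le_succ (by simpa using hlen))
          rw [this]
          simp [List.zipWith]

-- one column step on a state that is a map over List.range
theorem colStep_map_range (kv : String × List Int) (L : Nat) (g : Nat → PySem.Dict String Int)
    (hlen : kv.2.length = L) :
    (PySem.List.enumerate kv.2 0).foldl
        (fun y iv => y.set iv.1.toNat ((y.getD iv.1.toNat PySem.Dict.empty).insert kv.1 iv.2))
        ((List.range L).map g)
      = (List.range L).map (fun i => (g i).insert kv.1 (kv.2.getD i 0)) := by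
  have h0 : ((([] : List (PySem.Dict String Int)).length : Nat) : Int) = 0 := by simp
  have := inner_loop_eq_zipWith kv.1 kv.2 [] ((List.range L).map g) (by simp [hlen])
  rw [h0] at this
  simp only [List.nil_append] at this
  rw [this]
  have hdrop : ((List.range L).map g).drop kv.2.length = [] := by
    simp [hlen]
  rw [hdrop, List.append_nil]
  apply List.ext_getElem
  · simp [hlen]
  · intro i h1 h2
    simp only [List.getElem_zipWith, List.getElem_map, List.getElem_range]
    congr 1
    have hi : i < kv.2.length := by simpa [hlen] using h1
    rw [List.getD_eq_getElem?_getD, List.getElem?_eq_getElem hi]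
    rfl

-- exchanging the loop order: B's column-wise fold over x equals, per index, A's row fold
theorem fold_exchange (L : Nat) :
    ∀ (xs : List (String × List Int)) (g : Nat → PySem.Dict String Int),
      (∀ kv ∈ xs, kv.2.length = L) →
      xs.foldl (fun y kv =>
          (PySem.List.enumerate kv.2 0).foldl (fun y iv =>
            y.set iv.1.toNat ((y.getD iv.1.toNat PySem.Dict.empty).insert kv.1 iv.2)) y)
        ((List.range L).map g)
      = (List.range L).map (fun i =>
          xs.foldl (fun d kv => d.insert kv.1 (kv.2.getD i 0)) (g i)) := by
  intro xs
  induction xs with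
  | nil => intro g _; rfl
  | cons kv tl ih =>
      intro g hl
      rw [List.foldl_cons, colStep_map_range kv L g (hl kv List.mem_cons_self)]
      rw [ih _ (fun p hp => hl p (List.mem_cons_of_mem _ hp))]
      simp only [List.foldl_cons]

-- ===== VERDICT (by name: the statement is the Claim_ definition above) =====
theorem transpose_to_list_spec : Claim_equal_transpose_to_list := by
  intro x _ hpre
  obtain ⟨hne, huni⟩ := hpre
  cases hx : x with
  | nil => exact absurd hx hne
  | cons kv0 rest =>
  subst hx
  unfold Spec_transpose_to_list
  set L : Nat := kv0.2.length with hL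
  -- all lengths equal L
  have hall : ∀ kv ∈ kv0 :: rest, kv.2.length = L :=
    fun kv hkv => huni kv hkv kv0 List.mem_cons_self
  -- the scrutinee reduces to [L]
  have hscr : PySem.Set.ofList
      (PySem.Dict.values ((kv0 :: rest).foldl (fun d kv => d.insert kv.1 ((kv.2.length : Int))) PySem.Dict.empty))
      = [(L : Int)] := by
    apply ofList_all_const
    · -- values nonempty: kv0's key is among the keys, so items ≠ []
      intro hv
      have hitems : (((kv0 :: rest).foldl (fun d kv => d.insert kv.1 ((kv.2.length : Int))) PySem.Dict.empty)).items = [] := by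
        simp only [PySem.Dict.values] at hv
        exact List.map_eq_nil_iff.mp hv
      have hkmem : kv0.1 ∈ (((kv0 :: rest).foldl (fun d kv => d.insert kv.1 ((kv.2.length : Int))) PySem.Dict.empty)).keys := by
        rw [PySem.Dict.keys_foldl_insert_key (kv0 :: rest) Prod.fst (fun _ kv => ((kv.2.length : Int)))]
        rw [PySem.Set.mem_update]
        exact Or.inr (List.mem_map_of_mem List.mem_cons_self)
      simp only [PySem.Dict.keys, hitems] at hkmem
      simp at hkmem
    · exact values_foldl_len_const (L : Int) _ _ (by simp [PySem.Dict.values, PySem.Dict.empty]) (fun kv hkv => by rw [hall kv hkv])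
  unfold transpose_to_list transpose_to_list_alt
  rw [hscr]
  show (PySem.List.pyRange 0 (L : Int) 1).map (fun i =>
        PySem.Dict.items ((kv0 :: rest).foldl (fun d kv => d.insert kv.1 (PySem.List.pyGetD kv.2 i 0)) PySem.Dict.empty))
      = ((kv0 :: rest).foldl (fun y kv =>
            (PySem.List.enumerate kv.2 0).foldl (fun y iv =>
              y.set iv.1.toNat ((y.getD iv.1.toNat PySem.Dict.empty).insert kv.1 iv.2)) y)
          (List.replicate ((L : Int)).toNat PySem.Dict.empty)).map PySem.Dict.items
  -- both arms, at size = (L : Int)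
  have hrep : List.replicate ((L : Int)).toNat (PySem.Dict.empty : PySem.Dict String Int)
      = (List.range L).map (fun _ => (PySem.Dict.empty : PySem.Dict String Int)) := by
    simp [List.map_const', Int.toNat_natCast]
  rw [hrep, fold_exchange L _ _ hall]
  rw [PySem.List.pyRange_one, List.map_map, List.map_map]
  simp only [Int.sub_zero, Int.toNat_natCast]
  apply List.map_congr_left
  intro k _
  simp only [Function.comp]
  have harg : ∀ (d : PySem.Dict String Int) (kv : String × List Int),
      d.insert kv.1 (PySem.List.pyGetD kv.2 (0 + (k : Int)) 0) = d.insert kv.1 (kv.2.getD k 0) := by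
    intro d kv
    congr 1
    simp [PySem.List.pyGetD_natCast]
  simp only [harg]
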